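-- pv_equiv track=rewrite | github.com/Sumedha494/DSA-Questions | second_largest_element.py | second_largest_with_index
-- ===== SOURCE A (Python) =====
-- def second_largest_with_index(numbers):
--     """Find second largest and its index"""
--
--     if len(numbers) < 2:
--         return None, None
--
--     # Find largest
--     largest = max(numbers)
--     largest_idx = numbers.index(largest)
--
--     # Find second largest (excluding largest value)
--     second = float('-inf')
--     second_idx = -1
--
--     for i, num in enumerate(numbers):
--         if num > second and num < largest:
--             second = num
--             second_idx = i
--         elif num == largest and i != largest_idx and num > second:
--             # Handle case when second largest equals largest
--             second = num
--             second_idx = i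
--
--     if second == float('-inf'):
--         return None, None
--
--     return second, second_idx
-- ===== SOURCE B (Python) =====
-- def second_largest_with_index(numbers):
--     """Find second largest and its index: one forward pass keeping the two
--     running maxima (value, index) pairs; no separate max/index passes."""
--     g = None  # (value, first index) of the running maximum
--     s = None  # (value, index) of the runner-up
--     for i, num in enumerate(numbers):
--         if g is None or num > g[0]:
--             s = g
--             g = (num, i)
--         elif s is None or num > s[0]:
--             s = (num, i)
--     return (None, None) if s is None else s
-- ===== Notes on version B (the rewrite author's own statement) =====
-- stated objective: alternative
-- what changed: A makes three passes (max(), .index(), then a scan that excludes the maximum's first occurrence) with a float('-inf') sentinel; B is a single forward pass maintaining the running maximum and runner-up as (value, index) pairs with no sentinel and no guard.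
import Mathlib
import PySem

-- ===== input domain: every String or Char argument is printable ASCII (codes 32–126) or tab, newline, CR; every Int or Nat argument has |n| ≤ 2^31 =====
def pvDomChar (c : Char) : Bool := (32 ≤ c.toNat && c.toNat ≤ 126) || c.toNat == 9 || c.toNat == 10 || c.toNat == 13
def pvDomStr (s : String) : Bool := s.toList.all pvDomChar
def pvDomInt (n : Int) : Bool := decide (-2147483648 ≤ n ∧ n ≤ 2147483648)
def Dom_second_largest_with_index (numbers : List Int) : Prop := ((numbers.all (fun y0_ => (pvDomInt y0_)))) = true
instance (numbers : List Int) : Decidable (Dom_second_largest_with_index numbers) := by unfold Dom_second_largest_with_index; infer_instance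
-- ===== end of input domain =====

-- B replaces A's three passes (max, index, exclusion scan) by one forward pass that
-- maintains the running maximum and runner-up as (value, index) pairs; objective: alternative.

-- ===== PORT A =====
-- `num > second` with second starting at float('-inf'): since all inputs are Ints,
-- the sentinel is modelled exactly by `Option Int` with `none` = float('-inf')
-- (smaller than every Int, equal to no Int).
def pvGtSentinel (num : Int) (sec : Option Int) : Bool :=
  match sec with
  | none => true
  | some s => decide (num > s)

-- the `for i, num in enumerate(numbers)` loop of A, state = (second, second_idx)
def pvLoopA (largest : Int) (largest_idx : Nat) :
    List Int → Nat → Option Int × Int → Option Int × Int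
  | [], _, st => st
  | num :: rest, i, (sec, sidx) =>
    if pvGtSentinel num sec && decide (num < largest) then
      pvLoopA largest largest_idx rest (i+1) (some num, (i : Int))
    else if num == largest && !(i == largest_idx) && pvGtSentinel num sec then
      pvLoopA largest largest_idx rest (i+1) (some num, (i : Int))
    else
      pvLoopA largest largest_idx rest (i+1) (sec, sidx)

-- A's final `if second == float('-inf'): return None, None / return second, second_idx`
def pvWrapA : Option Int × Int → Option Int × Option Int
  | (none, _) => (none, none)
  | (some v, sidx) => (some v, some sidx)

def second_largest_with_index (numbers : List Int) : Option Int × Option Int :=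
  if numbers.length < 2 then (none, none)
  else
    match PySem.List.max? numbers (fun y => y) with
    | none => (none, none)      -- unreachable: numbers ≠ []
    | some largest =>
      match PySem.List.index? numbers largest with
      | none => (none, none)    -- unreachable: largest ∈ numbers
      | some largest_idx =>
        pvWrapA (pvLoopA largest largest_idx numbers 0 (none, -1))

-- ===== PORT B =====
-- `g is None or num > g[0]` (and the same test for s)
def pvBeats (num : Int) (g : Option (Int × Nat)) : Bool :=
  match g with
  | none => true
  | some (v, _) => decide (num > v)

-- the single enumerate loop of B, state = (g, s); returns the final state
def pvLoopB : List Int → Nat → Option (Int × Nat) → Option (Int × Nat) →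
    Option (Int × Nat) × Option (Int × Nat)
  | [], _, g, s => (g, s)
  | num :: rest, i, g, s =>
    if pvBeats num g then
      pvLoopB rest (i+1) (some (num, i)) g      -- s = g; g = (num, i)
    else if pvBeats num s then
      pvLoopB rest (i+1) g (some (num, i))
    else
      pvLoopB rest (i+1) g s

-- B's final `return (None, None) if s is None else s`
def pvWrapB : Option (Int × Nat) → Option Int × Option Int
  | none => (none, none)
  | some (v, j) => (some v, some (j : Int))

def second_largest_with_index_alt (numbers : List Int) : Option Int × Option Int :=
  pvWrapB (pvLoopB numbers 0 none none).2

-- ===== PRECONDITION & SPEC =====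
def Spec_second_largest_with_index (numbers : List Int) (out : Option Int × Option Int) : Prop := out = second_largest_with_index_alt numbers
instance (numbers : List Int) (out : Option Int × Option Int) : Decidable (Spec_second_largest_with_index numbers out) := by unfold Spec_second_largest_with_index; infer_instance

-- ===== CLAIM (what is proved, stated in full; the proofs are below) =====
def Claim_equal_second_largest_with_index : Prop := ∀ (numbers : List Int), Dom_second_largest_with_index numbers → Spec_second_largest_with_index numbers (second_largest_with_index numbers)

-- ===== LEMMAS AND PROOFS =====

-- correspondence between A's loop state (second, second_idx) and one Option-pair of B
def pvRel (st : Option Int × Int) (g : Option (Int × Nat)) : Prop :=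
  (st.1 = none ∧ g = none) ∨
    (∃ (v : Int) (j : Nat), st.1 = some v ∧ st.2 = (j : Int) ∧ g = some (v, j))

theorem pvRel_beats (x : Int) (sec : Option Int) (sidx : Int) (g : Option (Int × Nat))
    (h : pvRel (sec, sidx) g) : pvBeats x g = pvGtSentinel x sec := by
  rcases h with ⟨h1, h2⟩ | ⟨v, j, h1, h2, h3⟩ <;>
    simp_all [pvBeats, pvGtSentinel]

theorem pvLoopA_append (L : Int) (k : Nat) (p q : List Int) : ∀ (i : Nat) (st : Option Int × Int),
    pvLoopA L k (p ++ q) i st = pvLoopA L k q (i + p.length) (pvLoopA L k p i st) := by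
  induction p with
  | nil => intro i st; simp [pvLoopA]
  | cons x t ih =>
    intro i st
    obtain ⟨sec, sidx⟩ := st
    have h : i + 1 + t.length = i + (t.length + 1) := by omega
    simp only [List.cons_append, pvLoopA, List.length_cons]
    split_ifs <;> rw [ih, h]

theorem pvLoopB_append (p q : List Int) : ∀ (i : Nat) (g s : Option (Int × Nat)),
    pvLoopB (p ++ q) i g s
      = pvLoopB q (i + p.length) (pvLoopB p i g s).1 (pvLoopB p i g s).2 := by
  induction p with
  | nil => intro i g s; simp [pvLoopB]
  | cons x t ih =>
    intro i g s
    have h : i + 1 + t.length = i + (t.length + 1) := by omega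
    simp only [List.cons_append, pvLoopB, List.length_cons]
    split_ifs <;> rw [ih, h]

-- phase 1: over a prefix all of whose elements are < L, A's (second, second_idx)
-- and B's g evolve as the same running max, and g stays < L
theorem pvPhase1 (L : Int) (k : Nat) (p : List Int) (hp : ∀ x ∈ p, x < L) :
    ∀ (i : Nat) (sec : Option Int) (sidx : Int) (g s : Option (Int × Nat)),
    pvRel (sec, sidx) g → (∀ v j, g = some (v, j) → v < L) →
    pvRel (pvLoopA L k p i (sec, sidx)) ((pvLoopB p i g s).1) ∧
      (∀ v j, (pvLoopB p i g s).1 = some (v, j) → v < L) := by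
  induction p with
  | nil => intro i sec sidx g s hrel hbd; simpa [pvLoopA, pvLoopB] using ⟨hrel, hbd⟩
  | cons x t ih =>
    intro i sec sidx g s hrel hbd
    have hx : x < L := hp x (List.mem_cons_self)
    have hpt : ∀ y ∈ t, y < L := fun y hy => hp y (List.mem_cons_of_mem _ hy)
    have hcond := pvRel_beats x sec sidx g hrel
    simp only [pvLoopA, pvLoopB]
    by_cases hb : pvGtSentinel x sec = true
    · rw [if_pos (by simp [hb, hx]), if_pos (by rw [hcond]; exact hb)]
      exact ih hpt (i+1) (some x) (i : Int) (some (x, i)) g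
        (Or.inr ⟨x, i, rfl, rfl, rfl⟩) (by intro v j hvj; cases hvj; exact hx)
    · have hb' : pvGtSentinel x sec = false := by simpa using hb
      rw [if_neg (by simp [hb']), if_neg (by simp [hb']),
        if_neg (by rw [hcond]; simp [hb'])]
      by_cases hs : pvBeats x s = true
      · rw [if_pos hs]; exact ih hpt (i+1) sec sidx g (some (x, i)) hrel hbd
      · rw [if_neg hs]; exact ih hpt (i+1) sec sidx g s hrel hbd

-- phase 2: after the first occurrence of the maximum L (index k), A's state
-- corresponds to B's s and g is pinned at (L, k); the wrapped results agree
theorem pvPhase2 (L : Int) (k : Nat) (q : List Int) (hq : ∀ x ∈ q, x ≤ L) :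
    ∀ (i : Nat) (sec : Option Int) (sidx : Int) (s : Option (Int × Nat)),
    k < i → pvRel (sec, sidx) s →
    pvWrapA (pvLoopA L k q i (sec, sidx)) = pvWrapB ((pvLoopB q i (some (L, k)) s).2) := by
  induction q with
  | nil =>
    intro i sec sidx s _ hrel
    rcases hrel with ⟨h1, h2⟩ | ⟨v, j, h1, h2, h3⟩ <;>
      simp_all [pvLoopA, pvLoopB, pvWrapA, pvWrapB]
  | cons x t ih =>
    intro i sec sidx s hki hrel
    have hx : x ≤ L := hq x (List.mem_cons_self)
    have hqt : ∀ y ∈ t, y ≤ L := fun y hy => hq y (List.mem_cons_of_mem _ hy)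
    have hcond := pvRel_beats x sec sidx s hrel
    have hki' : k < i + 1 := Nat.lt_succ_of_lt hki
    have hBg : pvBeats x (some (L, k)) = false := by
      simp only [pvBeats, decide_eq_false_iff_not, not_lt]; exact hx
    simp only [pvLoopA, pvLoopB]
    by_cases hb : pvGtSentinel x sec = true
    · rcases lt_or_eq_of_le hx with hlt | heq
      · have hA1 : (pvGtSentinel x sec && decide (x < L)) = true := by simp [hb, hlt]
        rw [if_pos hA1, if_neg (by rw [hBg]; simp), if_pos (by rw [hcond, hb])]
        exact ih hqt (i+1) (some x) (i : Int) (some (x, i)) hki' (Or.inr ⟨x, i, rfl, rfl, rfl⟩)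
      · have hA1 : (pvGtSentinel x sec && decide (x < L)) = false := by simp [heq]
        have hA2 : (x == L && !(i == k) && pvGtSentinel x sec) = true := by
          have hik : i ≠ k := by omega
          simp [heq, hik, heq ▸ hb]
        rw [if_neg (by rw [hA1]; simp), if_pos hA2,
          if_neg (by rw [hBg]; simp), if_pos (by rw [hcond, hb])]
        exact ih hqt (i+1) (some x) (i : Int) (some (x, i)) hki' (Or.inr ⟨x, i, rfl, rfl, rfl⟩)
    · have hb' : pvGtSentinel x sec = false := by simpa using hb
      rw [if_neg (by rw [hb']; simp), if_neg (by rw [hb']; simp),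
        if_neg (by rw [hBg]; simp), if_neg (by rw [hcond, hb']; simp)]
      exact ih hqt (i+1) sec sidx s hki' hrel

-- assembling both phases over the decomposition numbers = pre ++ L :: suf
theorem pvMain (L : Int) (pre suf : List Int)
    (hpre : ∀ x ∈ pre, x < L) (hsuf : ∀ x ∈ suf, x ≤ L) :
    pvWrapA (pvLoopA L pre.length (pre ++ L :: suf) 0 (none, -1))
      = pvWrapB ((pvLoopB (pre ++ L :: suf) 0 none none).2) := by
  rw [pvLoopA_append, pvLoopB_append]
  rcases hstA : pvLoopA L pre.length pre 0 (none, -1) with ⟨sec, sidx⟩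
  rcases hstB : pvLoopB pre 0 none none with ⟨g1, s1⟩
  have h1 := pvPhase1 L pre.length pre hpre 0 none (-1) none none
    (Or.inl ⟨rfl, rfl⟩) (by intro v j h; cases h)
  rw [hstA, hstB] at h1
  have hbeat : pvBeats L g1 = true := by
    cases g1 with
    | none => rfl
    | some p =>
      obtain ⟨v, j⟩ := p
      simpa [pvBeats] using h1.2 v j rfl
  simp only [pvLoopA, pvLoopB, Nat.zero_add]
  rw [if_neg (by simp), if_neg (by simp), if_pos hbeat]
  exact pvPhase2 L pre.length suf hsuf (pre.length + 1) sec sidx g1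
    (Nat.lt_succ_self _) h1.1

-- ===== VERDICT (by name: the statement is the Claim_ definition above) =====
theorem second_largest_with_index_spec : Claim_equal_second_largest_with_index := by
  intro numbers _
  show second_largest_with_index numbers = second_largest_with_index_alt numbers
  match numbers with
  | [] => rfl
  | [x] => simp [second_largest_with_index, second_largest_with_index_alt,
      pvLoopB, pvBeats, pvWrapB]
  | x :: y :: r =>
    have hlen : ¬ (x :: y :: r).length < 2 := by simp
    obtain ⟨L, hL⟩ : ∃ L, PySem.List.max? (x :: y :: r) (fun v => v) = some L := by
      cases h : PySem.List.max? (x :: y :: r) (fun v => v) with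
      | none => exact absurd (Iff.mp (PySem.List.max?_eq_none_iff _ _) h) (by simp)
      | some L => exact ⟨L, rfl⟩
    have hmem : L ∈ x :: y :: r := PySem.List.max?_mem hL
    have hmax : ∀ v ∈ x :: y :: r, v ≤ L := fun v hv => PySem.List.max?_isMax hL v hv
    obtain ⟨k, hK⟩ : ∃ k, PySem.List.index? (x :: y :: r) L = some k :=
      Option.isSome_iff_exists.mp (Iff.mpr (PySem.List.index?_isSome_iff _ _) hmem)
    obtain ⟨pre, suf, hdec, hklen, hnpre⟩ := Iff.mp (PySem.List.index?_eq_some_iff _ _ _) hK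
    have hpre : ∀ v ∈ pre, v < L := fun v hv =>
      lt_of_le_of_ne (hmax v (hdec ▸ List.mem_append_left _ hv))
        (fun he => hnpre (he ▸ hv))
    have hsuf : ∀ v ∈ suf, v ≤ L := fun v hv =>
      hmax v (hdec ▸ List.mem_append_right _ (List.mem_cons_of_mem _ hv))
    simp only [second_largest_with_index, second_largest_with_index_alt,
      hL, hK, if_neg hlen]
    subst hklen
    rw [hdec]
    exact pvMain L pre suf hpre hsuf
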